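-- pv_equiv track=rewrite | github.com/willie-deev/simple-mahjong-server | CardUtils.py | getAllPairsPungs
-- ===== SOURCE A (Python) =====
-- def getAllPairsPungs(cards: list):
-- 	pairs = []
-- 	pungs = []
-- 	i = 0
-- 	while i < len(cards) - 1:
-- 		if cards[i] is None:
-- 			i += 1
-- 			continue
-- 		if cards[i] == cards[i + 1]:
-- 			pairs.append(i)
-- 			if i < len(cards) - 2 and cards[i] == cards[i + 2]:
-- 				pungs.append(i)
-- 			i += 1
-- 		i += 1
-- 	return pairs, pungs
-- ===== SOURCE B (Python) =====
-- def getAllPairsPungs(cards: list):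
--     # Phase 1: group into maximal runs of consecutive equal non-None cards.
--     runs = []
--     n = len(cards)
--     j = 0
--     while j < n:
--         if cards[j] is None:
--             j += 1
--             continue
--         k = j + 1
--         while k < n and cards[k] == cards[j]:
--             k += 1
--         runs.append((j, k - j))
--         j = k
--     # Phase 2: each run of length L starting at p yields pair starts at
--     # offsets 0,2,4,... (off+2 <= L) and pungs at those with off+3 <= L.
--     pairs = []
--     pungs = []
--     for p, L in runs:
--         off = 0
--         while off + 2 <= L:
--             pairs.append(p + off)
--             if off + 3 <= L:
--                 pungs.append(p + off)
--             off += 2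
--     return pairs, pungs
-- ===== Notes on version B (the rewrite author's own statement) =====
-- stated objective: alternative
-- what changed: Replaces A's greedy skip-by-2 single index walk with a two-phase computation: first group the list into maximal runs of consecutive equal non-None cards, then derive pair starts at even offsets 0,2,4,... of each run and pung starts at those offsets that leave room for a third card.
import Mathlib
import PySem

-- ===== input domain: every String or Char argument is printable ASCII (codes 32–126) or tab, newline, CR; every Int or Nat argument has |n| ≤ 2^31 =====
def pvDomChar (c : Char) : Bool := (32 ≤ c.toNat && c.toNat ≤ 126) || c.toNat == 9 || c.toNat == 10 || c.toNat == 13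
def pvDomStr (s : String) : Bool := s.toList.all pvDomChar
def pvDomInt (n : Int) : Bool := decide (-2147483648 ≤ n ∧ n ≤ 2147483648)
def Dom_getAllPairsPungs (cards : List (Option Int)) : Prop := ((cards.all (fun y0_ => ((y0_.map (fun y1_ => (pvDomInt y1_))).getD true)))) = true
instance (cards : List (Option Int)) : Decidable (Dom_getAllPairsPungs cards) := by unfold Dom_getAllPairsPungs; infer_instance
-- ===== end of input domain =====

-- ===== PORT A =====
-- B groups the cards into maximal runs first, then derives pairs/pungs from run lengths (same cost, different decomposition).
def goA (cards : List (Option Int)) (i : Nat) (pairs pungs : List Int) : List Int × List Int :=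
  if i + 1 < cards.length then
    if (cards.getD i none).isNone then
      goA cards (i + 1) pairs pungs
    else if cards.getD i none == cards.getD (i + 1) none then
      goA cards (i + 2) (pairs ++ [(i : Int)])
        (if i + 2 < cards.length ∧ cards.getD i none == cards.getD (i + 2) none then
          pungs ++ [(i : Int)] else pungs)
    else goA cards (i + 1) pairs pungs
  else (pairs, pungs)
termination_by cards.length - i

def getAllPairsPungs (cards : List (Option Int)) : List Int × List Int :=
  goA cards 0 [] []

-- ===== PORT B =====
-- inner while of phase 1: extend the run of value v from index k
def scanRun (cards : List (Option Int)) (v : Int) (k : Nat) : Nat :=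
  if k < cards.length then
    if cards.getD k none == some v then scanRun cards v (k + 1) else k
  else k
termination_by cards.length - k

-- used by runsFrom's termination proof (the port cites it in decreasing_by)
theorem scanRun_ge (cards : List (Option Int)) (v : Int) (k : Nat) :
    k ≤ scanRun cards v k := by
  rw [scanRun]
  split_ifs with h1 h2
  · have := scanRun_ge cards v (k + 1)
    omega
  · exact le_refl k
  · exact le_refl k
termination_by cards.length - k

-- phase 1: maximal runs of consecutive equal non-None cards, as (start, length)
def runsFrom (cards : List (Option Int)) (j : Nat) : List (Nat × Nat) :=
  if j < cards.length then
    match cards.getD j none with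
    | none => runsFrom cards (j + 1)
    | some v =>
      let k := scanRun cards v (j + 1)
      (j, k - j) :: runsFrom cards k
  else []
termination_by cards.length - j
decreasing_by
  · omega
  · have := scanRun_ge cards v (j + 1); omega

-- phase 2 inner while: emit pair/pung starts for one run
def emitRun (p L off : Nat) (pairs pungs : List Int) : List Int × List Int :=
  if off + 2 ≤ L then
    emitRun p L (off + 2) (pairs ++ [((p + off : Nat) : Int)])
      (if off + 3 ≤ L then pungs ++ [((p + off : Nat) : Int)] else pungs)
  else (pairs, pungs)
termination_by L - off

def getAllPairsPungs_alt (cards : List (Option Int)) : List Int × List Int :=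
  (runsFrom cards 0).foldl (fun acc r => emitRun r.1 r.2 0 acc.1 acc.2) ([], [])

-- ===== PRECONDITION & SPEC =====
def Spec_getAllPairsPungs (cards : List (Option Int)) (out : List Int × List Int) : Prop := out = getAllPairsPungs_alt cards
instance (cards : List (Option Int)) (out : List Int × List Int) : Decidable (Spec_getAllPairsPungs cards out) := by unfold Spec_getAllPairsPungs; infer_instance

-- ===== CLAIM (what is proved, stated in full; the proofs are below) =====
def Claim_equal_getAllPairsPungs : Prop := ∀ (cards : List (Option Int)), Dom_getAllPairsPungs cards → Spec_getAllPairsPungs cards (getAllPairsPungs cards)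

-- ===== LEMMAS AND PROOFS =====

theorem scanRun_le (cards : List (Option Int)) (v : Int) (k : Nat)
    (h : k ≤ cards.length) : scanRun cards v k ≤ cards.length := by
  rw [scanRun]
  split_ifs with h1 h2
  · exact scanRun_le cards v (k + 1) (by omega)
  · exact h
  · exact h
termination_by cards.length - k

theorem scanRun_eq_in (cards : List (Option Int)) (v : Int) (k : Nat) :
    ∀ t, k ≤ t → t < scanRun cards v k → cards.getD t none = some v := by
  intro t hkt ht
  rw [scanRun] at ht
  split_ifs at ht with h1 h2
  · rcases Nat.eq_or_lt_of_le hkt with rfl | hlt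
    · exact eq_of_beq h2
    · exact scanRun_eq_in cards v (k + 1) t hlt ht
  · omega
  · omega
termination_by cards.length - k

theorem scanRun_end (cards : List (Option Int)) (v : Int) (k : Nat)
    (h : k ≤ cards.length) :
    scanRun cards v k = cards.length ∨ cards.getD (scanRun cards v k) none ≠ some v := by
  rw [scanRun]
  split_ifs with h1 h2
  · exact scanRun_end cards v (k + 1) (by omega)
  · right
    intro he
    exact h2 (by rw [he]; simp)
  · left
    omega
termination_by cards.length - k

-- the greedy loop of A, run across one maximal run [j, k), accumulates exactly emitRun's output
theorem run_step (cards : List (Option Int)) (v : Int) (j k : Nat)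
    (hkL : k ≤ cards.length)
    (hv : ∀ t, j ≤ t → t < k → cards.getD t none = some v)
    (hend : k = cards.length ∨ cards.getD k none ≠ some v) :
    ∀ i, j ≤ i → i ≤ k → ∀ pairs pungs,
      goA cards i pairs pungs =
        goA cards k (emitRun j (k - j) (i - j) pairs pungs).1
          (emitRun j (k - j) (i - j) pairs pungs).2 := by
  intro i hji hik pairs pungs
  rcases Nat.eq_or_lt_of_le hik with rfl | hlt
  · rw [emitRun]
    have : ¬ (i - j + 2 ≤ i - j) := by omega
    simp [this]
  · have hvi : cards.getD i none = some v := hv i hji hlt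
    by_cases hI : i + 1 < cards.length
    · rw [goA]
      simp only [hI, if_true, hvi, Option.isNone_some, Bool.false_eq_true, if_false]
      by_cases hik1 : i + 1 < k
      · -- pair branch
        have hvi1 : cards.getD (i + 1) none = some v := hv (i + 1) (by omega) hik1
        have hbeq : (some v == cards.getD (i + 1) none) = true := by
          rw [hvi1]; simp
        rw [if_pos hbeq]
        -- pung condition ↔ i + 2 < k
        have hpung : (i + 2 < cards.length ∧ (some v == cards.getD (i + 2) none) = true) ↔ i + 2 < k := by
          constructor
          · rintro ⟨hl, he⟩
            have he' : cards.getD (i + 2) none = some v := (eq_of_beq he).symm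
            by_contra hnk
            have h2k : i + 2 = k := by omega
            rcases hend with hE | hE
            · omega
            · rw [h2k] at he'
              exact hE he'
          · intro h2
            rw [hv (i + 2) (by omega) h2]
            exact ⟨by omega, by simp⟩
        rw [emitRun]
        have hoff : i - j + 2 ≤ k - j := by omega
        rw [if_pos hoff]
        have hval : ((j + (i - j) : Nat) : Int) = (i : Int) := by
          have : j + (i - j) = i := by omega
          rw [this]
        have hoff3 : (i - j + 3 ≤ k - j) ↔ i + 2 < k := by omega
        have hstep : i - j + 2 = i + 2 - j := by omega
        rw [hval, hstep]
        have hrec := run_step cards v j k hkL hv hend (i + 2) (by omega) (by omega)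
          (pairs ++ [(i : Int)])
          (if i - j + 3 ≤ k - j then pungs ++ [(i : Int)] else pungs)
        have hcond : (if i + 2 < cards.length ∧ (some v == cards.getD (i + 2) none) = true then pungs ++ [(i : Int)] else pungs)
            = (if i - j + 3 ≤ k - j then pungs ++ [(i : Int)] else pungs) := by
          by_cases hc : i + 2 < k
          · rw [if_pos (hpung.mpr hc), if_pos (by omega)]
          · rw [if_neg (fun hx => hc (hpung.mp hx)), if_neg (by omega)]
        rw [hcond]
        exact hrec
      · -- i + 1 = k : pair test fails, step to k
        have hk1 : i + 1 = k := by omega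
        have hvk : cards.getD (i + 1) none ≠ some v := by
          rcases hend with hE | hE
          · omega
          · rw [hk1]; exact hE
        have hbeq : ¬ (some v == cards.getD (i + 1) none) = true := by
          intro hb
          exact hvk (eq_of_beq hb).symm
        rw [if_neg hbeq]
        rw [emitRun]
        have : ¬ (i - j + 2 ≤ k - j) := by omega
        rw [if_neg this]
        rw [hk1]
    · -- i + 1 = length, so k = length = i + 1
      have hk : k = i + 1 := by omega
      rw [goA, if_neg hI]
      rw [emitRun]
      have : ¬ (i - j + 2 ≤ k - j) := by omega
      rw [if_neg this]
      rw [goA]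
      have : ¬ (k + 1 < cards.length) := by omega
      rw [if_neg this]
termination_by i => k - i

theorem goA_runs (cards : List (Option Int)) :
    ∀ j pairs pungs, goA cards j pairs pungs =
      (runsFrom cards j).foldl (fun acc r => emitRun r.1 r.2 0 acc.1 acc.2) (pairs, pungs) := by
  intro j pairs pungs
  rw [runsFrom]
  by_cases hj : j < cards.length
  · rw [if_pos hj]
    cases hv : cards.getD j none with
    | none =>
      by_cases hj1 : j + 1 < cards.length
      · rw [goA, if_pos hj1, hv]
        simp only [Option.isNone_none, if_true]
        exact goA_runs cards (j + 1) pairs pungs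
      · rw [goA]
        have : ¬ (j + 1 < cards.length) := hj1
        rw [if_neg this]
        rw [runsFrom]
        have : ¬ (j + 1 < cards.length) := hj1
        rw [if_neg this]
        rfl
    | some v =>
      simp only
      set k := scanRun cards v (j + 1) with hkdef
      have h1 : j + 1 ≤ k := scanRun_ge cards v (j + 1)
      have h2 : k ≤ cards.length := scanRun_le cards v (j + 1) (by omega)
      have hvall : ∀ t, j ≤ t → t < k → cards.getD t none = some v := by
        intro t hjt htk
        rcases Nat.eq_or_lt_of_le hjt with rfl | hlt
        · exact hv
        · exact scanRun_eq_in cards v (j + 1) t hlt htk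
      have hend := scanRun_end cards v (j + 1) (by omega)
      have hmain := run_step cards v j k h2 hvall hend j (le_refl j) (by omega) pairs pungs
      rw [List.foldl_cons]
      have hjj : j - j = 0 := by omega
      rw [hjj] at hmain
      rw [hmain]
      exact goA_runs cards k (emitRun j (k - j) 0 pairs pungs).1 (emitRun j (k - j) 0 pairs pungs).2
  · rw [if_neg hj]
    rw [goA]
    have : ¬ (j + 1 < cards.length) := by omega
    rw [if_neg this]
    rfl
termination_by j => cards.length - j
decreasing_by
  · omega
  · have := scanRun_ge cards v (j + 1); omega

-- ===== VERDICT (by name: the statement is the Claim_ definition above) =====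
theorem getAllPairsPungs_spec : Claim_equal_getAllPairsPungs := by
  intro cards _
  unfold Spec_getAllPairsPungs getAllPairsPungs getAllPairsPungs_alt
  exact goA_runs cards 0 [] []
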